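-- pv_equiv track=rewrite | github.com/DLR-SC/tigl-conda | build_recipes.py | sorted_packages
-- ===== SOURCE A (Python) =====
-- def sorted_packages(packages_to_build):
--
--     if len(packages_to_build) == 0:
--         return ()
--
--     build_order = ['cmake',
--                    'ninja',
--                    'swig4',
--                    'doxygen',
--                    'tbb',
--                    'freeimage',
--                    'freetype',
--                    'gl2ps',
--                    'curl',
--                    'curl-static'
--                    'libxml2',
--                    'libxml2-static',
--                    'libxslt',
--                    'libxstl-static',
--                    'tixi',
--                    'tixi3',
--                    'oce-0.16',
--                    'oce-0.17',
--                    'opencascade',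
--                    'python-occ',
--                    'python-occ_0.17',
--                    'python-occ-7x',
--                    'pythreejs',
--                    'tigl',
--                    'tigl3']
--
--     index_array = []
--     for lib in packages_to_build:
--         try:
--             lib_idx = build_order.index(lib)
--         except ValueError:
--             lib_idx = -1
--         index_array.append(lib_idx)
--
--     build_idx, to_build_sorted = zip(*sorted(zip(index_array, packages_to_build)))
--
--     return to_build_sorted
-- ===== SOURCE B (Python) =====
-- def sorted_packages(packages_to_build):
--
--     build_order = ['cmake',
--                    'ninja',
--                    'swig4',
--                    'doxygen',
--                    'tbb',
--                    'freeimage',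
--                    'freetype',
--                    'gl2ps',
--                    'curl',
--                    'curl-static'
--                    'libxml2',
--                    'libxml2-static',
--                    'libxslt',
--                    'libxstl-static',
--                    'tixi',
--                    'tixi3',
--                    'oce-0.16',
--                    'oce-0.17',
--                    'opencascade',
--                    'python-occ',
--                    'python-occ_0.17',
--                    'python-occ-7x',
--                    'pythreejs',
--                    'tigl',
--                    'tigl3']
--
--     # Distribution ("bucket") pass instead of a comparison sort on (index, name) pairs:
--     # unknown packages come first, in plain alphabetical order; then, for each name of
--     # the fixed build order in turn, every occurrence of that name is appended.
--     result = sorted(lib for lib in packages_to_build if lib not in build_order)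
--     for name in build_order:
--         result += [lib for lib in packages_to_build if lib == name]
--     return tuple(result)
-- ===== Notes on version B (the rewrite author's own statement) =====
-- stated objective: alternative
-- what changed: Replaces the index_array loop plus zip/sort/unzip comparison sort on (index, name) pairs by a distribution pass: one plain alphabetical sort of the packages not in build_order, then one bucket-collecting pass per build_order name appending all its occurrences.
import Mathlib
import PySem

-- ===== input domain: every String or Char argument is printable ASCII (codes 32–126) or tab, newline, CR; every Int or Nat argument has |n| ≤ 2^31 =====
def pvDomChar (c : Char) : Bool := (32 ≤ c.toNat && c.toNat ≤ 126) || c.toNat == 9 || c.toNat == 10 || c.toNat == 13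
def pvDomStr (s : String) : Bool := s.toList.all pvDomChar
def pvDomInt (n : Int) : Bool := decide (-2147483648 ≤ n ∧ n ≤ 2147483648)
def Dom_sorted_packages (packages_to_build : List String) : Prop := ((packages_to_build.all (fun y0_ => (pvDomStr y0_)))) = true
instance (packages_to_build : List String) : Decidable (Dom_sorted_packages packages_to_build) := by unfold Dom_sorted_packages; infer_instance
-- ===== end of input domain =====

-- B replaces A's (index, name)-pair comparison sort (index loop + zip/sort/unzip) by a
-- distribution pass: one plain sort of the unknown packages, then one bucket per build_order name.


-- the fixed build-order list (note: 'curl-static' 'libxml2' in the Python source is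
-- implicit string concatenation, hence the single element "curl-staticlibxml2")
def pvBuildOrder : List String :=
  ["cmake", "ninja", "swig4", "doxygen", "tbb", "freeimage", "freetype", "gl2ps",
   "curl", "curl-staticlibxml2", "libxml2-static", "libxslt", "libxstl-static",
   "tixi", "tixi3", "oce-0.16", "oce-0.17", "opencascade", "python-occ",
   "python-occ_0.17", "python-occ-7x", "pythreejs", "tigl", "tigl3"]

-- ===== PORT A =====
-- try: build_order.index(lib) except ValueError: -1
def pvIdxA (lib : String) : Int :=
  match PySem.List.index? pvBuildOrder lib with
  | some i => (i : Int)
  | none => -1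

def sorted_packages (packages_to_build : List String) : List String :=
  if packages_to_build.length = 0 then []
  else
    -- index_array loop: append build_order.index(lib) (or -1) for each lib
    let index_array : List Int :=
      packages_to_build.foldl (fun acc lib => acc ++ [pvIdxA lib]) []
    -- zip(index_array, packages_to_build), sorted by tuple comparison, project the names
    let pairs := index_array.zip packages_to_build
    (PySem.List.sorted2 pairs Prod.fst Prod.snd).map Prod.snd

-- ===== PORT B =====
-- result = sorted(lib for lib in packages_to_build if lib not in build_order)
-- for name in build_order: result += [lib for lib in packages_to_build if lib == name]
def sorted_packages_alt (packages_to_build : List String) : List String :=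
  let result := PySem.List.sorted
    (packages_to_build.filter (fun lib => !(pvBuildOrder.contains lib))) (fun x => x)
  pvBuildOrder.foldl
    (fun result name => result ++ packages_to_build.filter (fun lib => lib == name)) result

-- ===== PRECONDITION & SPEC =====
def Spec_sorted_packages (packages_to_build : List String) (out : List String) : Prop := out = sorted_packages_alt packages_to_build
instance (packages_to_build : List String) (out : List String) : Decidable (Spec_sorted_packages packages_to_build out) := by unfold Spec_sorted_packages; infer_instance

-- ===== CLAIM (what is proved, stated in full; the proofs are below) =====
def Claim_equal_sorted_packages : Prop := ∀ (packages_to_build : List String), Dom_sorted_packages packages_to_build → Spec_sorted_packages packages_to_build (sorted_packages packages_to_build)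

-- ===== LEMMAS AND PROOFS =====

-- the lexicographic sort key both programs realise: (build-order index, name)
def pvKey (lib : String) : Int ×ₗ String := toLex (pvIdxA lib, lib)

theorem key_lt_of_idx_lt {a b : String} (h : pvIdxA a < pvIdxA b) : pvKey a < pvKey b :=
  Prod.Lex.lt_iff.mpr (Or.inl h)

theorem key_le_of_eq_le {a b : String} (h1 : pvIdxA a = pvIdxA b) (h2 : a ≤ b) :
    pvKey a ≤ pvKey b :=
  Prod.Lex.le_iff.mpr (Or.inr ⟨h1, h2⟩)

theorem pvKey_inj : Function.Injective pvKey := by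
  intro a b h
  exact congrArg (fun p => (ofLex p).2) h

-- A's tuple comparison on (index, name) pairs is the strict order of pvKey
theorem cmp_eq (a b : String) :
    (decide (pvIdxA a < pvIdxA b) || !decide (pvIdxA b < pvIdxA a) && decide (a < b))
      = decide (pvKey a < pvKey b) := by
  simp only [pvKey, Prod.Lex.lt_iff, ofLex_toLex]
  rcases lt_trichotomy (pvIdxA a) (pvIdxA b) with h | h | h
  · simp [h]
  · simp [h]
  · simp [h, not_lt_of_gt h, ne_of_gt h]

-- inserting a pair into a list of pairs is inserting the name with the pvKey order
theorem insertBy_map_pair (x : String) (l : List String) :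
    PySem.List.insertBy
      (fun a b : Int × String =>
        decide (a.1 < b.1) || !decide (b.1 < a.1) && decide (a.2 < b.2))
      (pvIdxA x, x) (l.map (fun p => (pvIdxA p, p)))
      = (PySem.List.insertBy (fun a b : String => decide (pvKey a < pvKey b))
          x l).map (fun p => (pvIdxA p, p)) := by
  induction l with
  | nil => rfl
  | cons y ys ih =>
    simp only [List.map_cons, PySem.List.insertBy, cmp_eq]
    split_ifs with hc
    · simp
    · simp only [List.map_cons]
      exact congrArg (List.cons (pvIdxA y, y)) ih

-- sorting the (index, name) pairs = sorting the names by pvKey (fold form)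
theorem sorted_pairs_eq (xs : List String) (acc : List String) :
    (xs.map (fun p => (pvIdxA p, p))).foldl
      (fun l x => PySem.List.insertBy
        (fun a b : Int × String =>
          decide (a.1 < b.1) || !decide (b.1 < a.1) && decide (a.2 < b.2)) x l)
      (acc.map (fun p => (pvIdxA p, p)))
      = (xs.foldl
          (fun l x => PySem.List.insertBy
            (fun a b : String => decide (pvKey a < pvKey b)) x l)
          acc).map (fun p => (pvIdxA p, p)) := by
  induction xs generalizing acc with
  | nil => rfl
  | cons x xs ih =>
    simp only [List.map_cons, List.foldl_cons]
    rw [insertBy_map_pair, ih]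

theorem zip_map_self {α β : Type} (g : α → β) (l : List α) :
    (l.map g).zip l = l.map (fun x => (g x, x)) := by
  induction l with
  | nil => rfl
  | cons x xs ih => simp [ih]

theorem index_array_eq (xs : List String) :
    xs.foldl (fun acc lib => acc ++ [pvIdxA lib]) [] = xs.map pvIdxA := by
  simpa using PySem.List.foldl_append_singleton_eq_map pvIdxA xs []

-- A computes sorted(packages, key=pvKey)
theorem A_eq_sorted (xs : List String) :
    sorted_packages xs = PySem.List.sorted xs pvKey := by
  unfold sorted_packages
  by_cases hnil : xs.length = 0
  · rw [if_pos hnil, List.length_eq_zero_iff.mp hnil]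
    rfl
  · rw [if_neg hnil]
    simp only [index_array_eq, zip_map_self]
    unfold PySem.List.sorted2
    simp only [if_neg (by decide : ¬ (false = true))]
    have h := sorted_pairs_eq xs []
    simp only [List.map_nil] at h
    rw [h, List.map_map]
    have hid : (Prod.snd ∘ fun p : String => (pvIdxA p, p)) = id := rfl
    rw [hid, List.map_id]
    rw [PySem.List.sorted_eq_foldl_insertBy]

theorem idx_of_not_mem {a : String} (h : a ∉ pvBuildOrder) : pvIdxA a = -1 := by
  unfold pvIdxA
  rw [(PySem.List.index?_eq_none_iff _ _).mpr h]

theorem idx_nonneg_of_mem {a : String} (h : a ∈ pvBuildOrder) : 0 ≤ pvIdxA a := by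
  unfold pvIdxA
  cases hi : PySem.List.index? pvBuildOrder a with
  | none => exact absurd h ((PySem.List.index?_eq_none_iff _ _).mp hi)
  | some i => simp

theorem pairwise_of_all_eq (l : List String) (n : String) (h : ∀ a ∈ l, a = n) :
    l.Pairwise (fun a b => pvKey a ≤ pvKey b) := by
  induction l with
  | nil => exact List.Pairwise.nil
  | cons x t ih =>
    refine List.Pairwise.cons (fun b hb => ?_) (ih fun a ha => h a (List.mem_cons_of_mem _ ha))
    rw [h x List.mem_cons_self, h b (List.mem_cons_of_mem _ hb)]

-- the concatenated buckets are pvKey-sorted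
theorem pairwise_flat (xs ns : List String)
    (h : ns.Pairwise (fun a b => pvIdxA a < pvIdxA b)) :
    (ns.flatMap (fun n => xs.filter (fun lib => lib == n))).Pairwise
      (fun a b => pvKey a ≤ pvKey b) := by
  induction ns with
  | nil => exact List.Pairwise.nil
  | cons n t ih =>
    obtain ⟨hhead, htail⟩ := List.pairwise_cons.mp h
    rw [List.flatMap_cons, List.pairwise_append]
    refine ⟨pairwise_of_all_eq _ n (fun a ha => by simpa using (List.mem_filter.mp ha).2),
           ih htail, fun a ha b hb => ?_⟩
    have ha' : a = n := by simpa using (List.mem_filter.mp ha).2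
    obtain ⟨m, hm, hbm⟩ := List.mem_flatMap.mp hb
    have hb' : b = m := by simpa using (List.mem_filter.mp hbm).2
    rw [ha', hb']
    exact le_of_lt (key_lt_of_idx_lt (hhead m hm))

-- splitting off one bucket at a time is a permutation
theorem perm_buckets (ns xs : List String) (hnd : ns.Nodup) :
    ((xs.filter (fun x => !(ns.contains x))) ++
      ns.flatMap (fun n => xs.filter (fun x => x == n))).Perm xs := by
  induction ns with
  | nil => simp
  | cons n t ih =>
    obtain ⟨hn, ht⟩ := List.nodup_cons.mp hnd
    have h1 : (xs.filter (fun x => !(t.contains x))).filter (fun x => x == n)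
        = xs.filter (fun x => x == n) := by
      rw [List.filter_filter]
      refine List.filter_congr fun x _ => ?_
      by_cases hxn : x = n
      · subst hxn; simp [hn]
      · simp [hxn]
    have h2 : (xs.filter (fun x => !(t.contains x))).filter (fun x => !(x == n))
        = xs.filter (fun x => !((n :: t).contains x)) := by
      rw [List.filter_filter]
      refine List.filter_congr fun x _ => ?_
      cases hx1 : (x == n) <;> cases hx2 : t.contains x <;> simp_all
    have hsplit : (xs.filter (fun x => !((n :: t).contains x)) ++
        xs.filter (fun x => x == n)).Perm (xs.filter (fun x => !(t.contains x))) := by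
      have := List.filter_append_perm (fun x => x == n)
        (xs.filter (fun x => !(t.contains x)))
      rw [h1, h2] at this
      exact List.perm_append_comm.trans this
    rw [List.flatMap_cons, ← List.append_assoc]
    exact ((hsplit.append_right _).trans (ih ht))

-- the two key facts about the fixed list, by computation
theorem buildOrder_nodup : pvBuildOrder.Nodup := by decide
theorem buildOrder_idx_mono : pvBuildOrder.Pairwise (fun a b => pvIdxA a < pvIdxA b) := by decide

-- B in append form
theorem B_eq_append (xs : List String) :
    sorted_packages_alt xs
      = PySem.List.sorted (xs.filter (fun lib => !(pvBuildOrder.contains lib))) (fun x => x)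
        ++ pvBuildOrder.flatMap (fun n => xs.filter (fun lib => lib == n)) := by
  unfold sorted_packages_alt
  exact PySem.List.foldl_append_eq_flatMap _ _ _

-- ===== VERDICT (by name: the statement is the Claim_ definition above) =====
theorem sorted_packages_spec : Claim_equal_sorted_packages := by
  intro xs _
  show sorted_packages xs = sorted_packages_alt xs
  rw [A_eq_sorted, B_eq_append]
  set init := PySem.List.sorted (xs.filter (fun lib => !(pvBuildOrder.contains lib))) (fun x => x) with hinit
  set flat := pvBuildOrder.flatMap (fun n => xs.filter (fun lib => lib == n)) with hflat
  have hmem_init : ∀ a ∈ init, a ∉ pvBuildOrder := by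
    intro a ha
    rw [hinit, PySem.List.mem_sorted] at ha
    simpa using (List.mem_filter.mp ha).2
  have hmem_flat : ∀ b ∈ flat, b ∈ pvBuildOrder := by
    intro b hb
    rw [hflat] at hb
    obtain ⟨m, hm, hbm⟩ := List.mem_flatMap.mp hb
    have : b = m := by simpa using (List.mem_filter.mp hbm).2
    exact this ▸ hm
  refine PySem.List.eq_of_perm_of_pairwise_le_of_injective pvKey pvKey_inj ?_ ?_ ?_
  · -- (sorted xs pvKey).Perm (init ++ flat)
    refine (PySem.List.sorted_perm xs pvKey false).trans ?_
    refine (perm_buckets pvBuildOrder xs buildOrder_nodup).symm.trans ?_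
    exact ((PySem.List.sorted_perm _ (fun x => x) false).symm.append_right _)
  · exact PySem.List.sorted_pairwise xs pvKey
  · rw [List.pairwise_append]
    refine ⟨?_, pairwise_flat xs pvBuildOrder buildOrder_idx_mono, ?_⟩
    · -- init is alphabetically sorted and all its indices are -1
      refine (PySem.List.sorted_pairwise _ (fun x => x)).imp_of_mem ?_
      intro a b ha hb hle
      refine key_le_of_eq_le ?_ hle
      rw [idx_of_not_mem (hmem_init a ha), idx_of_not_mem (hmem_init b hb)]
    · intro a ha b hb
      have h1 : pvIdxA a = -1 := idx_of_not_mem (hmem_init a ha)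
      have h2 : 0 ≤ pvIdxA b := idx_nonneg_of_mem (hmem_flat b hb)
      exact le_of_lt (key_lt_of_idx_lt (by omega))
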